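-- pv_equiv track=rewrite | github.com/nathanassis/code-solutions | beecrowd/1486.py | findToothpicks
-- ===== SOURCE A (Python) =====
-- def findToothpicks(list, size):
--     cont, aux = 0, 0
--     for i in list:
--         if i == 1:
--             aux += 1
--             if aux == size:
--                 cont += 1
--         else:
--             aux = 0
--     return cont
-- ===== SOURCE B (Python) =====
-- def findToothpicks(list, size):
--     # Group-then-filter: build the lengths of maximal runs of 1s, then count those >= size.
--     if size < 1:
--         return 0
--     runs = []
--     cur = 0
--     for x in list:
--         if x == 1:
--             cur += 1
--         else:
--             runs.append(cur)
--             cur = 0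
--     runs.append(cur)
--     return sum(1 for r in runs if r >= size)
-- ===== Notes on version B (the rewrite author's own statement) =====
-- stated objective: alternative
-- what changed: B decomposes the task into building the list of maximal-1-run lengths and then counting how many are >= size (with an explicit size<1 guard), instead of A's single pass with a running counter that fires exactly when the counter hits size.
import Mathlib
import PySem

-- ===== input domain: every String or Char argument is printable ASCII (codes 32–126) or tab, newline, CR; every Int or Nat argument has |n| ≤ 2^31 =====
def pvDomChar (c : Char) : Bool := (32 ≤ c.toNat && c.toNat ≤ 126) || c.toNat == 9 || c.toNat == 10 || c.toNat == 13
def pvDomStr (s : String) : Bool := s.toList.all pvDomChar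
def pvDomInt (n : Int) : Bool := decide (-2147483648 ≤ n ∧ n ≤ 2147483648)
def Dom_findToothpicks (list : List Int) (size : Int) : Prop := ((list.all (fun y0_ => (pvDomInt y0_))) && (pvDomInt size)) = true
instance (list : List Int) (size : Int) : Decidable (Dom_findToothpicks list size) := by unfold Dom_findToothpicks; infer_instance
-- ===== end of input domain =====

-- B builds the list of maximal-1-run lengths and counts those >= size; same O(n) cost, different decomposition (objective: alternative).
-- ===== PORT A =====
def findToothpicks (list : List Int) (size : Int) : Int :=
  (list.foldl (fun (st : Int × Int) i =>
    if i = 1 then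
      let aux := st.2 + 1
      if aux = size then (st.1 + 1, aux) else (st.1, aux)
    else (st.1, 0)) (0, 0)).1

-- ===== PORT B =====
def findToothpicks_alt (list : List Int) (size : Int) : Int :=
  if size < 1 then 0
  else
    let st := list.foldl (fun (st : List Int × Int) x =>
      if x = 1 then (st.1, st.2 + 1)
      else (st.1 ++ [st.2], 0)) ([], 0)
    let runs := st.1 ++ [st.2]
    ((runs.filter (fun r => size ≤ r)).length : Int)

-- ===== PRECONDITION & SPEC =====
def Spec_findToothpicks (list : List Int) (size : Int) (out : Int) : Prop := out = findToothpicks_alt list size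
instance (list : List Int) (size : Int) (out : Int) : Decidable (Spec_findToothpicks list size out) := by unfold Spec_findToothpicks; infer_instance

-- ===== CLAIM (what is proved, stated in full; the proofs are below) =====
def Claim_equal_findToothpicks : Prop := ∀ (list : List Int) (size : Int), Dom_findToothpicks list size → Spec_findToothpicks list size (findToothpicks list size)

-- ===== LEMMAS AND PROOFS =====

-- A's loop keeps cont unchanged when size < 1 (aux never reaches a non-positive size).
theorem pvA_small (size : Int) (hs : size < 1) :
    ∀ (l : List Int) (c a : Int), 0 ≤ a →
      (l.foldl (fun (st : Int × Int) i =>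
        if i = 1 then
          let aux := st.2 + 1
          if aux = size then (st.1 + 1, aux) else (st.1, aux)
        else (st.1, 0)) (c, a)).1 = c := by
  intro l
  induction l with
  | nil => intro c a _; rfl
  | cons x l ih =>
    intro c a ha
    simp only [List.foldl_cons]
    by_cases hx : x = 1
    · simp only [if_pos hx]
      have hne : a + 1 ≠ size := by omega
      simp only [if_neg hne]
      exact ih c (a + 1) (by omega)
    · simp only [if_neg hx]
      exact ih c 0 le_rfl

-- B's run builder with a general accumulated prefix.
theorem pvB_acc :
    ∀ (l : List Int) (rs : List Int) (a : Int),
      (l.foldl (fun (st : List Int × Int) x =>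
        if x = 1 then (st.1, st.2 + 1)
        else (st.1 ++ [st.2], 0)) (rs, a)) =
      (rs ++ (l.foldl (fun (st : List Int × Int) x =>
        if x = 1 then (st.1, st.2 + 1)
        else (st.1 ++ [st.2], 0)) ([], a)).1,
       (l.foldl (fun (st : List Int × Int) x =>
        if x = 1 then (st.1, st.2 + 1)
        else (st.1 ++ [st.2], 0)) ([], a)).2) := by
  intro l
  induction l with
  | nil => intro rs a; simp
  | cons x l ih =>
    intro rs a
    simp only [List.foldl_cons]
    by_cases hx : x = 1
    · simp only [if_pos hx]; exact ih rs (a + 1)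
    · simp only [if_neg hx]
      rw [ih (rs ++ [a]) 0]
      rw [show ([] ++ [a] : List Int) = [a] from rfl, ih [a] 0]
      simp

-- Main invariant for size ≥ 1: A's count from state (c, a) plus "current run already counted"
-- equals c plus the number of qualifying runs of l seeded with prefix length a.
theorem pvMain (size : Int) (hs : 1 ≤ size) :
    ∀ (l : List Int) (c a : Int), 0 ≤ a →
      (l.foldl (fun (st : Int × Int) i =>
        if i = 1 then
          let aux := st.2 + 1
          if aux = size then (st.1 + 1, aux) else (st.1, aux)
        else (st.1, 0)) (c, a)).1
      + (if size ≤ a then (1 : Int) else 0)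
      = c + ((((l.foldl (fun (st : List Int × Int) x =>
          if x = 1 then (st.1, st.2 + 1)
          else (st.1 ++ [st.2], 0)) ([], a)).1
          ++ [(l.foldl (fun (st : List Int × Int) x =>
          if x = 1 then (st.1, st.2 + 1)
          else (st.1 ++ [st.2], 0)) ([], a)).2]).filter (fun r => size ≤ r)).length : Int) := by
  intro l
  induction l with
  | nil =>
    intro c a _
    simp only [List.foldl_nil, List.nil_append, List.filter]
    by_cases h : size ≤ a
    · simp [h]
    · simp [h]
  | cons x l ih =>
    intro c a ha
    simp only [List.foldl_cons]
    by_cases hx : x = 1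
    · simp only [if_pos hx]
      by_cases hcnt : a + 1 = size
      · simp only [if_pos hcnt]
        have := ih (c + 1) (a + 1) (by omega)
        have h1 : ¬ size ≤ a := by omega
        have h2 : size ≤ a + 1 := by omega
        simp only [if_pos h2] at this
        simp only [if_neg h1]
        omega
      · simp only [if_neg hcnt]
        have := ih c (a + 1) (by omega)
        by_cases h : size ≤ a
        · have h2 : size ≤ a + 1 := by omega
          simp only [if_pos h2] at this
          simp only [if_pos h]
          omega
        · have h2 : ¬ size ≤ a + 1 := by omega
          simp only [if_neg h2] at this
          simp only [if_neg h]
          omega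
    · simp only [if_neg hx]
      have := ih c 0 le_rfl
      have h0 : ¬ size ≤ (0 : Int) := by omega
      simp only [if_neg h0, add_zero] at this
      simp only [List.nil_append]
      rw [pvB_acc l [a] 0]
      by_cases h : size ≤ a
      · simp only [List.cons_append, List.nil_append, List.filter_cons, h,
          decide_true, if_true, List.length_cons]
        push_cast
        omega
      · simp only [if_neg h, List.cons_append, List.nil_append, List.filter_cons]
        rw [if_neg (by simpa using h)]
        omega

-- ===== VERDICT (by name: the statement is the Claim_ definition above) =====
theorem findToothpicks_spec : Claim_equal_findToothpicks := by
  intro list size _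
  unfold Spec_findToothpicks findToothpicks findToothpicks_alt
  by_cases hs : size < 1
  · simp only [if_pos hs]
    exact pvA_small size hs list 0 0 le_rfl
  · simp only [if_neg hs]
    have h := pvMain size (by omega) list 0 0 le_rfl
    have h0 : ¬ size ≤ (0 : Int) := by omega
    simp only [if_neg h0, add_zero, zero_add] at h
    exact h
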